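-- pv_equiv track=rewrite | github.com/s-surineni/atice | ppython/hacker_earth/sub_arr2.py | find_bwd_len
-- ===== SOURCE A (Python) =====
-- def find_bwd_len(arr):
--     arlen = len(arr)
--     len_arr = [1] * arlen
--     great_stack = []
--     for idx in range(arlen - 1, -1, -1):
--         val = arr[idx]
--         if great_stack:
--             while great_stack and arr[great_stack[-1]] < val:
--                 less_idx = great_stack.pop()
--                 len_arr[less_idx] = abs(idx - less_idx)
--
--             great_stack.append(idx)
--         else:
--             great_stack.append(idx)
--     for idx, val in enumerate(great_stack):
--         len_arr[val] = val + 1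
--     return len_arr
-- ===== SOURCE B (Python) =====
-- def find_bwd_len(arr):
--     # Stock-span DP: span[i] = distance to the previous strictly-greater element
--     # (or i+1 if none); computed by jumping backward over already-computed spans.
--     span = []
--     for i in range(len(arr)):
--         s = 1
--         while i - s >= 0 and arr[i - s] <= arr[i]:
--             s += span[i - s]
--         span.append(s)
--     return span
-- ===== Notes on version B (the rewrite author's own statement) =====
-- stated objective: alternative
-- what changed: Replaced the right-to-left monotonic-stack sweep with its final fix-up pass by the classic left-to-right stock-span DP that keeps no stack and jumps backward over already-computed span values.
import Mathlib
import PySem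

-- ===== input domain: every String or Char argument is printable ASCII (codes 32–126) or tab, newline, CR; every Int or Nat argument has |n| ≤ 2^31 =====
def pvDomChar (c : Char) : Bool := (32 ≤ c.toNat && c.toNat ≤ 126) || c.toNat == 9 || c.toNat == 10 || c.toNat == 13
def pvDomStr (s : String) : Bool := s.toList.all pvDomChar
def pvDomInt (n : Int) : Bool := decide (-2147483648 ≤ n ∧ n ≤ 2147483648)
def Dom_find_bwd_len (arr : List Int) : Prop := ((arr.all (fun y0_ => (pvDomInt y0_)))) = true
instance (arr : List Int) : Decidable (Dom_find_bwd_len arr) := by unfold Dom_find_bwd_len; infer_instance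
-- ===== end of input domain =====

-- B replaces A's right-to-left monotonic-stack sweep (and its final fix-up pass over the
-- surviving stack) with the classic left-to-right stock-span DP that keeps no stack and
-- jumps backward over already-computed span values; same return value, alternative algorithm.

-- ===== PORT A =====
-- the Python stack (append/pop at the END of the list) is represented top-first: append = cons, pop = uncons
def popA (arr : List Int) (idx val : Int) (len_arr : List Int) : List Int → List Int × List Int
  | [] => (len_arr, [])
  | j :: rest =>
    if PySem.List.pyGetD arr j 0 < val then
      popA arr idx val (PySem.List.pySetD len_arr j |idx - j|) rest
    else (len_arr, j :: rest)

def aStep (arr : List Int) (st : List Int × List Int) (idx : Int) : List Int × List Int :=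
  let val := PySem.List.pyGetD arr idx 0
  match st.2 with
  | [] => (st.1, idx :: st.2)
  | _ :: _ =>
    let r := popA arr idx val st.1 st.2
    (r.1, idx :: r.2)

def find_bwd_len (arr : List Int) : List Int :=
  let arlen := PySem.List.len arr
  let st := (PySem.List.pyRange (arlen - 1) (-1) (-1)).foldl (aStep arr) (List.replicate arlen.toNat 1, [])
  (PySem.List.enumerate st.2.reverse 0).foldl (fun l p => PySem.List.pySetD l p.2 (p.2 + 1)) st.1

-- ===== PORT B =====
def altWhile (arr span : List Int) (i : Int) : Nat → Int → Int
  | 0, s => s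
  | fuel + 1, s =>
    if 0 ≤ i - s ∧ PySem.List.pyGetD arr (i - s) 0 ≤ PySem.List.pyGetD arr i 0 then
      altWhile arr span i fuel (s + PySem.List.pyGetD span (i - s) 0)
    else s
def find_bwd_len_alt (arr : List Int) : List Int :=
  (PySem.List.pyRange 0 (PySem.List.len arr) 1).foldl
    (fun span i => span ++ [altWhile arr span i (i.toNat + 1) 1]) []

-- ===== PRECONDITION & SPEC =====
def Spec_find_bwd_len (arr : List Int) (out : List Int) : Prop := out = find_bwd_len_alt arr
instance (arr : List Int) (out : List Int) : Decidable (Spec_find_bwd_len arr out) := by unfold Spec_find_bwd_len; infer_instance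

-- ===== CLAIM (what is proved, stated in full; the proofs are below) =====
def Claim_equal_find_bwd_len : Prop := ∀ (arr : List Int), Dom_find_bwd_len arr → Spec_find_bwd_len arr (find_bwd_len arr)

-- ===== LEMMAS AND PROOFS =====

def gIdx (arr : List Int) (i : Nat) : Int :=
  match (List.range i).reverse.find? (fun j => decide (arr.getD i 0 < arr.getD j 0)) with
  | some j => (j : Int)
  | none => -1

theorem gIdx_ge (arr : List Int) (i : Nat) : -1 ≤ gIdx arr i := by
  unfold gIdx
  cases h : (List.range i).reverse.find? (fun j => decide (arr.getD i 0 < arr.getD j 0)) with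
  | none => simp
  | some j => simp

theorem gIdx_lt (arr : List Int) (i : Nat) : gIdx arr i < (i : Int) := by
  unfold gIdx
  cases h : (List.range i).reverse.find? (fun j => decide (arr.getD i 0 < arr.getD j 0)) with
  | none => simp; omega
  | some j =>
    have := List.mem_of_find?_eq_some h
    simp only [List.mem_reverse, List.mem_range] at this
    simp; omega

theorem gIdx_gt (arr : List Int) (i : Nat) (h : 0 ≤ gIdx arr i) :
    arr.getD i 0 < arr.getD (gIdx arr i).toNat 0 := by
  unfold gIdx at *
  cases hf : (List.range i).reverse.find? (fun j => decide (arr.getD i 0 < arr.getD j 0)) with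
  | none => simp only [hf] at h; simp at h
  | some j =>
    have := List.find?_some hf
    simp only [decide_eq_true_eq] at this
    simpa using this

theorem gIdx_between (arr : List Int) (i k : Nat) (h1 : gIdx arr i < (k : Int)) (h2 : k < i) :
    arr.getD k 0 ≤ arr.getD i 0 := by
  unfold gIdx at h1
  cases hf : (List.range i).reverse.find? (fun j => decide (arr.getD i 0 < arr.getD j 0)) with
  | none =>
    have := List.find?_eq_none.mp hf k (by simp [List.mem_range]; omega)
    simpa using this
  | some j =>
    simp only [hf] at h1
    have hjk : j < k := by exact_mod_cast h1
    obtain ⟨hp, l1, l2, hsplit, hbefore⟩ := List.find?_eq_some_iff_append.mp hf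
    have hpw : ((List.range i).reverse).Pairwise (fun a b => b < a) := by
      simpa [List.pairwise_reverse] using (List.pairwise_lt_range (n := i))
    rw [hsplit] at hpw
    have hk : k ∈ l1 := by
      have hkmem : k ∈ (List.range i).reverse := by simp [List.mem_range]; omega
      rw [hsplit] at hkmem
      rcases List.mem_append.mp hkmem with h | h
      · exact h
      · rcases List.mem_cons.mp h with h | h
        · omega
        · have h2' := (List.pairwise_append.mp hpw).2.1
          have := (List.pairwise_cons.mp h2').1 k h
          omega
    have := hbefore k hk
    simpa using this

theorem gIdx_unique (arr : List Int) (i : Nat) (g : Int) (h0 : -1 ≤ g) (h1 : g < (i : Int))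
    (h2 : ∀ k : Nat, g < (k : Int) → k < i → arr.getD k 0 ≤ arr.getD i 0)
    (h3 : 0 ≤ g → arr.getD i 0 < arr.getD g.toNat 0) : gIdx arr i = g := by
  rcases lt_trichotomy (gIdx arr i) g with h | h | h
  · exfalso
    have hge := gIdx_ge arr i
    have hg0 : 0 ≤ g := by omega
    have := gIdx_between arr i g.toNat (by omega) (by omega)
    have := h3 hg0
    omega
  · exact h
  · exfalso
    have hG0 : 0 ≤ gIdx arr i := by omega
    have hGlt := gIdx_lt arr i
    have := h2 (gIdx arr i).toNat (by omega) (by omega)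
    have := gIdx_gt arr i hG0
    omega

theorem gIdx_ge_of (arr : List Int) (k j : Nat) (hk : k < j) (h : arr.getD j 0 < arr.getD k 0) :
    (k : Int) ≤ gIdx arr j := by
  by_contra hc
  have hc' : gIdx arr j < (k : Int) := by omega
  have := gIdx_between arr j k hc' hk
  omega

def specList (arr : List Int) : List Int :=
  (List.range arr.length).map (fun j : Nat => (j : Int) - gIdx arr j)

-- ---- generic list lemmas ----
theorem takeWhile_eq_filter (p : α → Bool) :
    ∀ (l : List α), l.Pairwise (fun x y => p y = true → p x = true) → l.takeWhile p = l.filter p := by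
  intro l
  induction l with
  | nil => simp
  | cons a l ih =>
    intro h
    rcases List.pairwise_cons.mp h with ⟨ha, hl⟩
    by_cases hp : p a = true
    · simp [List.takeWhile_cons, List.filter_cons, hp, ih hl]
    · have hnil : l.filter p = [] := List.filter_eq_nil_iff.mpr (fun x hx hpx => by
        have := ha x hx hpx; simp [hp] at this)
      simp [List.takeWhile_cons, List.filter_cons, hp, hnil]

theorem dropWhile_eq_filter (p : α → Bool) :
    ∀ (l : List α), l.Pairwise (fun x y => p y = true → p x = true) →
      l.dropWhile p = l.filter (fun x => !p x) := by
  intro l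
  induction l with
  | nil => simp
  | cons a l ih =>
    intro h
    rcases List.pairwise_cons.mp h with ⟨ha, hl⟩
    by_cases hp : p a = true
    · simp [List.dropWhile_cons, List.filter_cons, hp, ih hl]
    · have hself : l.filter (fun x => !p x) = l := List.filter_eq_self.mpr (fun x hx => by
        by_cases hpx : p x = true
        · have := ha x hx hpx; simp [hp] at this
        · simp [hpx])
      simp [List.dropWhile_cons, List.filter_cons, hp, hself]

theorem popA_eq (arr : List Int) (idx val : Int) :
    ∀ (st len : List Int),
      popA arr idx val len st =
        ((st.takeWhile (fun j => decide (PySem.List.pyGetD arr j 0 < val))).foldl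
            (fun l j => PySem.List.pySetD l j |idx - j|) len,
          st.dropWhile (fun j => decide (PySem.List.pyGetD arr j 0 < val))) := by
  intro st
  induction st with
  | nil => intro len; simp [popA]
  | cons j rest ih =>
    intro len
    by_cases h : PySem.List.pyGetD arr j 0 < val
    · simp [popA, h, List.takeWhile_cons, List.dropWhile_cons, ih]
    · simp [popA, h, List.takeWhile_cons, List.dropWhile_cons]

theorem getElem?_foldl_set (f : Nat → Int) :
    ∀ (js : List Nat) (X : List Int) (k : Nat), (∀ j ∈ js, j < X.length) →
      (js.foldl (fun (l : List Int) (j : Nat) => l.set j (f j)) X)[k]? =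
        if k ∈ js then some (f k) else X[k]? := by
  intro js
  induction js with
  | nil => intro X k h; simp
  | cons j js ih =>
    intro X k h
    rw [List.foldl_cons,
        ih _ k (fun j' hj' => by rw [List.length_set]; exact h j' (List.mem_cons_of_mem _ hj'))]
    by_cases hk : k ∈ js
    · simp [hk]
    · simp only [hk, if_false, List.mem_cons]
      by_cases hkj : k = j
      · subst hkj
        simp [List.getElem?_set, h k (List.mem_cons_self)]
      · simp [List.getElem?_set, hkj, Ne.symm hkj]

-- ---- stack / len invariants ----
def stk (arr : List Int) (i : Nat) : List Int :=
  ((List.range' i (arr.length - i)).filter (fun j => decide (gIdx arr j < (i : Int)))).map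
    (fun j : Nat => (j : Int))

def lenSpec (arr : List Int) (i : Nat) : List Int :=
  (List.range arr.length).map
    (fun j : Nat => if i ≤ j ∧ (i : Int) ≤ gIdx arr j then (j : Int) - gIdx arr j else 1)

theorem aStep_spec (arr : List Int) (i : Nat) (hi : i < arr.length) :
    aStep arr (lenSpec arr (i + 1), stk arr (i + 1)) (i : Int) = (lenSpec arr i, stk arr i) := by
  cases hS : stk arr (i + 1) with
  | nil =>
    -- the stack is empty only before the first (rightmost) index: i + 1 = arr.length
    have hn : arr.length = i + 1 := by
      by_contra hne
      have hmem : i + 1 ∈ List.range' (i + 1) (arr.length - (i + 1)) := by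
        rw [List.mem_range'_1]; omega
      have := List.filter_eq_nil_iff.mp (by
        have := congrArg (List.map (fun j : Int => j)) hS
        unfold stk at hS
        exact List.map_eq_nil_iff.mp hS) _ hmem
      have hlt := gIdx_lt arr (i + 1)
      simp at this
      omega
    simp only [aStep, hS]
    simp only [Prod.mk.injEq]
    refine ⟨?_, ?_⟩
    · unfold lenSpec
      apply List.map_congr_left
      intro j hj
      rw [List.mem_range] at hj
      have h1 := gIdx_lt arr j
      rw [if_neg (by push_cast; omega), if_neg (by push_cast; omega)]
    · unfold stk
      rw [show arr.length - i = 1 by omega, List.range'_one]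
      simp [gIdx_lt arr i]
  | cons j0 rest =>
    have hval : PySem.List.pyGetD arr (i : Int) 0 = arr.getD i 0 := PySem.List.pyGetD_natCast ..
    simp only [aStep, hS]
    rw [← hS, hval, popA_eq]
    set n := arr.length with hn
    set F : List Nat := List.range' (i + 1) (n - (i + 1)) with hF
    set pred : Int → Bool := fun x => decide (PySem.List.pyGetD arr x 0 < arr.getD i 0) with hpred
    have hSF : stk arr (i + 1) = (F.filter (fun j => decide (gIdx arr j < ((i + 1 : Nat) : Int)))).map
        (fun j : Nat => (j : Int)) := rfl
    have hFmem : ∀ j ∈ F, i + 1 ≤ j ∧ j < n := fun j hj => by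
      rw [hF, List.mem_range'_1] at hj; omega
    have hiff : ∀ j : Nat, i + 1 ≤ j → gIdx arr j < ((i + 1 : Nat) : Int) →
        (arr.getD j 0 < arr.getD i 0 ↔ gIdx arr j = (i : Int)) := by
      intro j hj hgj
      constructor
      · intro h
        have := gIdx_ge_of arr i j (by omega) h
        push_cast at hgj
        omega
      · intro h
        have h0 : 0 ≤ gIdx arr j := by rw [h]; positivity
        have := gIdx_gt arr j h0
        rw [h] at this
        simpa using this
    have hpw : (stk arr (i + 1)).Pairwise (fun x y => pred y = true → pred x = true) := by
      rw [hSF, List.pairwise_map]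
      apply List.Pairwise.imp_of_mem ?_ ((List.pairwise_lt_range' ..).filter _)
      intro j1 j2 h1 h2 hlt hp2
      rw [List.mem_filter] at h1 h2
      obtain ⟨hm1, hg1⟩ := h1
      obtain ⟨hm2, hg2⟩ := h2
      simp only [hpred, PySem.List.pyGetD_natCast, decide_eq_true_eq] at hp2 ⊢
      simp only [decide_eq_true_eq] at hg1 hg2
      have hbet : arr.getD j1 0 ≤ arr.getD j2 0 := by
        apply gIdx_between arr j2 j1 ?_ hlt
        have := (hFmem j1 hm1).1
        push_cast at hg2 ⊢
        omega
      omega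
    rw [takeWhile_eq_filter _ _ hpw, dropWhile_eq_filter _ _ hpw, hSF,
        List.filter_map, List.filter_map, List.filter_filter, List.filter_filter]
    have hTake : F.filter (fun a => (pred ∘ fun j : Nat => (j : Int)) a &&
          decide (gIdx arr a < ((i + 1 : Nat) : Int))) =
        F.filter (fun j => decide (gIdx arr j = (i : Int))) := by
      apply List.filter_congr
      intro j hj
      obtain ⟨hj1, hj2⟩ := hFmem j hj
      simp only [Function.comp, hpred, PySem.List.pyGetD_natCast]
      by_cases hg : gIdx arr j < ((i + 1 : Nat) : Int)
      · rw [decide_eq_true hg, Bool.and_true, decide_eq_decide]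
        exact hiff j hj1 hg
      · rw [decide_eq_false hg, Bool.and_false,
            decide_eq_false (by push_cast at hg ⊢; omega : ¬ gIdx arr j = (i : Int))]
    have hDrop : F.filter (fun a => ((fun x => !pred x) ∘ fun j : Nat => (j : Int)) a &&
          decide (gIdx arr a < ((i + 1 : Nat) : Int))) =
        F.filter (fun j => decide (gIdx arr j < (i : Int))) := by
      apply List.filter_congr
      intro j hj
      obtain ⟨hj1, hj2⟩ := hFmem j hj
      rw [Bool.eq_iff_iff]
      simp only [Function.comp, hpred, PySem.List.pyGetD_natCast, Bool.and_eq_true,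
        Bool.not_eq_true', decide_eq_false_iff_not, decide_eq_true_eq]
      constructor
      · rintro ⟨hnp, hlt⟩
        by_cases he : gIdx arr j = (i : Int)
        · exact absurd ((hiff j hj1 hlt).mpr he) hnp
        · push_cast at hlt ⊢; omega
      · intro hlt
        have hlt1 : gIdx arr j < ((i + 1 : Nat) : Int) := by push_cast at hlt ⊢; omega
        refine ⟨fun hp => ?_, hlt1⟩
        have := (hiff j hj1 hlt1).mp hp
        omega
    rw [hTake, hDrop]
    simp only [Prod.mk.injEq]
    refine ⟨?_, ?_⟩
    · -- length-array component
      have hconv : ∀ (js : List Nat) (X : List Int),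
          ((js.map (fun j : Nat => (j : Int))).foldl
              (fun l j => PySem.List.pySetD l j |(i : Int) - j|) X) =
            js.foldl (fun (l : List Int) (j : Nat) => l.set j |(i : Int) - (j : Int)|) X := by
        intro js X
        rw [List.foldl_map]
        have he : (fun (x : List Int) (y : Nat) => PySem.List.pySetD x (y : Int) |(i : Int) - (y : Int)|)
            = fun (x : List Int) (y : Nat) => x.set y |(i : Int) - (y : Int)| := by
          funext x y; exact PySem.List.pySetD_natCast ..
        rw [he]
      rw [hconv]
      have hlenlen : (lenSpec arr (i + 1)).length = n := by simp only [lenSpec, List.length_map, List.length_range]; exact hn.symm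
      apply List.ext_getElem?
      intro k
      rw [getElem?_foldl_set (fun jn : Nat => |(i : Int) - (jn : Int)|) _ _ k
          (fun j hj => by rw [hlenlen]; exact (hFmem j (List.mem_of_mem_filter hj)).2)]
      by_cases hk : k ∈ F.filter (fun j => decide (gIdx arr j = (i : Int)))
      · rw [if_pos hk]
        rw [List.mem_filter] at hk
        obtain ⟨hkF, hkQ⟩ := hk
        obtain ⟨hk1, hk2⟩ := hFmem k hkF
        simp only [decide_eq_true_eq] at hkQ
        have hkr : (List.range arr.length)[k]? = some k := by
          exact List.getElem?_range hk2
        simp only [lenSpec, List.getElem?_map, hkr, Option.map_some]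
        rw [if_pos ⟨by omega, by rw [hkQ]⟩]
        rw [hkQ, abs_sub_comm, abs_of_nonneg (by push_cast; omega)]
      · rw [if_neg hk]
        by_cases hkn : k < n
        · have hkr : (List.range arr.length)[k]? = some k := by
            exact List.getElem?_range hkn
          simp only [lenSpec, List.getElem?_map, hkr, Option.map_some]
          by_cases hc : (i + 1 ≤ k ∧ ((i + 1 : Nat) : Int) ≤ gIdx arr k)
          · rw [if_pos hc, if_pos ⟨by omega, by push_cast at hc ⊢; omega⟩]
          · rw [if_neg hc, if_neg ?_]
            rintro ⟨hc1, hc2⟩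
            have hglt := gIdx_lt arr k
            have hki : i + 1 ≤ k := by omega
            have hgi : gIdx arr k = (i : Int) := by push_cast at hc ⊢; omega
            exact hk (List.mem_filter.mpr ⟨by rw [hF, List.mem_range'_1]; omega, by simp [hgi]⟩)
        · rw [List.getElem?_eq_none (by rw [hlenlen]; omega),
              List.getElem?_eq_none (by simp only [lenSpec, List.length_map, List.length_range]; omega)]
    · -- stack component
      rw [show stk arr i = ((List.range' i (n - i)).filter
            (fun j => decide (gIdx arr j < (i : Int)))).map (fun j : Nat => (j : Int)) from rfl]
      rw [show n - i = (n - (i + 1)) + 1 by omega, List.range'_succ]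
      rw [List.filter_cons_of_pos (by simpa using gIdx_lt arr i)]
      simp [hF]

theorem loop_spec (arr : List Int) : ∀ (i : Nat), i ≤ arr.length →
    (PySem.List.pyRange ((i : Int) - 1) (-1) (-1)).foldl (aStep arr) (lenSpec arr i, stk arr i)
      = (lenSpec arr 0, stk arr 0) := by
  intro i
  induction i with
  | zero => intro _; rw [PySem.List.pyRange_neg_one_eq_nil (by omega)]; rfl
  | succ i ih =>
    intro h
    rw [show ((i + 1 : Nat) : Int) - 1 = (i : Int) by push_cast; ring,
        PySem.List.pyRange_neg_one_cons (by omega), List.foldl_cons, aStep_spec arr i (by omega)]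
    exact ih (by omega)

theorem foldl_enumerate_snd (g : List Int → Int → List Int) :
    ∀ (xs : List Int) (s : Int) (X : List Int),
      (PySem.List.enumerate xs s).foldl (fun l p => g l p.2) X = xs.foldl g X := by
  intro xs
  induction xs with
  | nil => intro s X; simp [PySem.List.enumerate]
  | cons x xs ih => intro s X; rw [PySem.List.enumerate_cons, List.foldl_cons, List.foldl_cons, ih]

theorem a_eq_spec (arr : List Int) : find_bwd_len arr = specList arr := by
  unfold find_bwd_len
  simp only [PySem.List.len_eq]
  have hinit1 : List.replicate ((arr.length : Int)).toNat 1 = lenSpec arr arr.length := by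
    rw [Int.toNat_natCast]
    unfold lenSpec
    have : ((List.range arr.length).map
        (fun j : Nat => if arr.length ≤ j ∧ ((arr.length : Nat) : Int) ≤ gIdx arr j
          then (j : Int) - gIdx arr j else 1)) =
        (List.range arr.length).map (fun _ : Nat => (1 : Int)) := by
      apply List.map_congr_left
      intro j hj
      rw [List.mem_range] at hj
      rw [if_neg (by omega)]
    rw [this, List.map_const', List.length_range]
  have hinit2 : ([] : List Int) = stk arr arr.length := by
    unfold stk
    rw [Nat.sub_self]
    simp
  rw [hinit1, hinit2, loop_spec arr arr.length (le_refl _),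
      foldl_enumerate_snd (fun l v => PySem.List.pySetD l v (v + 1))]
  have hstk0 : stk arr 0 = ((List.range' 0 arr.length).filter
      (fun j => decide (gIdx arr j < (0 : Int)))).map (fun j : Nat => (j : Int)) := by
    unfold stk; rw [Nat.sub_zero]; norm_num
  rw [hstk0, ← List.map_reverse]
  set js : List Nat := ((List.range' 0 arr.length).filter
      (fun j => decide (gIdx arr j < (0 : Int)))).reverse with hjs
  have hjsmem : ∀ j ∈ js, j < arr.length ∧ gIdx arr j < 0 := by
    intro j hj
    rw [hjs, List.mem_reverse, List.mem_filter, List.mem_range'_1] at hj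
    obtain ⟨h1, h2⟩ := hj
    simp only [decide_eq_true_eq] at h2
    exact ⟨by omega, h2⟩
  have hconv : ∀ (X : List Int),
      ((js.map (fun j : Nat => (j : Int))).foldl
          (fun l v => PySem.List.pySetD l v (v + 1)) X) =
        js.foldl (fun (l : List Int) (j : Nat) => l.set j ((j : Int) + 1)) X := by
    intro X
    rw [List.foldl_map]
    have he : (fun (x : List Int) (y : Nat) => PySem.List.pySetD x (y : Int) ((y : Int) + 1))
        = fun (x : List Int) (y : Nat) => x.set y ((y : Int) + 1) := by
      funext x y; exact PySem.List.pySetD_natCast ..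
    rw [he]
  rw [hconv]
  have hlen0 : (lenSpec arr 0).length = arr.length := by
    simp only [lenSpec, List.length_map, List.length_range]
  apply List.ext_getElem?
  intro k
  rw [getElem?_foldl_set (fun jn : Nat => (jn : Int) + 1) _ _ k
      (fun j hj => by rw [hlen0]; exact (hjsmem j hj).1)]
  by_cases hk : k ∈ js
  · rw [if_pos hk]
    obtain ⟨hk1, hk2⟩ := hjsmem k hk
    have hge := gIdx_ge arr k
    have hkr : (List.range arr.length)[k]? = some k := List.getElem?_range hk1
    simp only [specList, List.getElem?_map, hkr, Option.map_some]
    have : gIdx arr k = -1 := by omega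
    rw [this]
    norm_num
  · rw [if_neg hk]
    by_cases hkn : k < arr.length
    · have hkr : (List.range arr.length)[k]? = some k := List.getElem?_range hkn
      simp only [specList, lenSpec, List.getElem?_map, hkr, Option.map_some]
      have hg0 : (0 : Int) ≤ gIdx arr k := by
        by_contra hg
        exact hk (by
          rw [hjs, List.mem_reverse, List.mem_filter]
          exact ⟨List.mem_range'_1.mpr ⟨Nat.zero_le _, by omega⟩, by simp; omega⟩)
      rw [if_pos ⟨Nat.zero_le _, hg0⟩]
    · rw [List.getElem?_eq_none (by rw [hlen0]; omega),
          List.getElem?_eq_none (by simp only [specList, List.length_map, List.length_range]; omega)]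

theorem altWhile_correct (arr : List Int) (i : Nat) :
    ∀ (fuel : Nat) (s : Int), 1 ≤ s → gIdx arr i ≤ (i : Int) - s →
    (∀ k : Nat, (i : Int) - s < (k : Int) → k < i → arr.getD k 0 ≤ arr.getD i 0) →
    (i : Int) - s + 2 ≤ (fuel : Int) →
    altWhile arr ((List.range i).map (fun j : Nat => (j : Int) - gIdx arr j)) i fuel s
      = (i : Int) - gIdx arr i := by
  intro fuel
  induction fuel with
  | zero =>
    intro s h1 h2 h3 hfuel
    exfalso; have := gIdx_ge arr i; simp at hfuel; omega
  | succ fuel ih =>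
    intro s h1 h2 h3 hfuel
    simp only [altWhile]
    have hge := gIdx_ge arr i
    by_cases hc : 0 ≤ (i:Int) - s ∧ PySem.List.pyGetD arr ((i:Int) - s) 0 ≤ PySem.List.pyGetD arr (i:Int) 0
    · rw [if_pos hc]
      obtain ⟨hp0, hple⟩ := hc
      set q : Nat := ((i:Int) - s).toNat with hq
      have hqi : (q:Int) = (i:Int) - s := by omega
      have hqlt : q < i := by omega
      have harr : PySem.List.pyGetD arr ((i:Int) - s) 0 = arr.getD q 0 := by
        rw [PySem.List.pyGetD_of_nonneg arr 0 hp0]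
      have harr2 : PySem.List.pyGetD arr (i:Int) 0 = arr.getD i 0 := by simp
      have hspan : PySem.List.pyGetD ((List.range i).map (fun j : Nat => (j : Int) - gIdx arr j)) ((i:Int) - s) 0
          = (q:Int) - gIdx arr q := by
        rw [PySem.List.pyGetD_of_nonneg _ 0 hp0, PySem.List.getD_map_range _ _ _ _ hqlt]
      rw [hspan]
      have hgq_lt := gIdx_lt arr q
      have hgq_ge := gIdx_ge arr q
      have hle : arr.getD q 0 ≤ arr.getD i 0 := by rw [harr, harr2] at hple; exact hple
      have hkey : gIdx arr i ≤ gIdx arr q := by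
        by_contra hcon
        have hGi0 : 0 ≤ gIdx arr i := by omega
        have hne : gIdx arr i ≠ (q:Int) := by
          intro he
          have hgt := gIdx_gt arr i hGi0
          rw [he] at hgt
          simp only [Int.toNat_natCast] at hgt
          omega
        have hbet := gIdx_between arr q (gIdx arr i).toNat (by omega) (by omega)
        have hgt := gIdx_gt arr i hGi0
        omega
      apply ih (s + ((q:Int) - gIdx arr q)) (by omega) (by omega) ?_ (by push_cast at hfuel ⊢; omega)
      intro k hk1 hk2
      rcases lt_trichotomy k q with h | h | h
      · exact le_trans (gIdx_between arr q k (by omega) h) hle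
      · subst h; exact hle
      · exact h3 k (by omega) hk2
    · rw [if_neg hc]
      by_cases hp : 0 ≤ (i:Int) - s
      · have hlt : arr.getD i 0 < arr.getD ((i:Int) - s).toNat 0 := by
          rcases not_and_or.mp hc with h | h
          · exact absurd hp h
          · rw [PySem.List.pyGetD_of_nonneg arr 0 hp, PySem.List.pyGetD_natCast] at h
            omega
        have hg := gIdx_unique arr i ((i:Int) - s) (by omega) (by omega)
          (fun k hk1 hk2 => h3 k hk1 hk2) (fun _ => hlt)
        omega
      · have : gIdx arr i = -1 := by omega
        omega

theorem alt_prefix (arr : List Int) (m : Nat) :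
    (PySem.List.pyRange 0 (m : Int) 1).foldl
      (fun span i => span ++ [altWhile arr span i (i.toNat + 1) 1]) []
      = (List.range m).map (fun j : Nat => (j : Int) - gIdx arr j) := by
  induction m with
  | zero => simp [PySem.List.pyRange_one_eq_nil]
  | succ m ih =>
    rw [show ((m + 1 : Nat) : Int) = (m : Int) + 1 by push_cast; ring,
        PySem.List.pyRange_one_succ_right (by positivity), List.foldl_append]
    simp only [List.foldl_cons, List.foldl_nil]
    rw [ih, List.range_succ, List.map_append, List.map_singleton]
    congr 1
    rw [show ((m : Int).toNat + 1) = m + 1 by simp]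
    have hlt := gIdx_lt arr m
    have := altWhile_correct arr m (m + 1) 1 (le_refl 1) (by omega)
      (by intro k hk1 hk2; omega) (by push_cast; omega)
    rw [this]

theorem alt_eq_spec (arr : List Int) : find_bwd_len_alt arr = specList arr := by
  unfold find_bwd_len_alt specList
  rw [PySem.List.len_eq]
  exact alt_prefix arr arr.length

-- ===== VERDICT (by name: the statement is the Claim_ definition above) =====
theorem find_bwd_len_spec : Claim_equal_find_bwd_len := by
  intro arr _
  unfold Spec_find_bwd_len
  rw [a_eq_spec, alt_eq_spec]
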